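-- pv_equiv track=rewrite | github.com/privateCodingFlo/Uni | EPROG/Serie07/1.py | _recaman_rekursiv_helfer
-- ===== SOURCE A (Python) =====
-- def _recaman_rekursiv_helfer(n, folge, folge_elemente):
--     """
--     Hilfsfunktion: Berechnet die Folge rekursiv, indem sie den Zustand (Folge und Set)
--     in jedem Aufruf mitschleppt.
--     """
--     # ABBRUCHBEDINGUNG: Wenn die Liste die Länge n+1 hat, haben wir a_n erreicht.
--     if n == len(folge) - 1:
--         return folge[-1]
--
--     a_vorher = folge[-1]
--     i = len(folge)  # Der aktuelle Sprung-Wert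
--
--     subtraktion = a_vorher - i
--
--     # Regelprüfung wie oben (Rückwärts-Sprung erlaubt?)
--     if subtraktion > 0 and subtraktion not in folge_elemente:
--         a_aktuell = subtraktion
--     else:
--         a_aktuell = a_vorher + i
--
--     # Zustand aktualisieren
--     folge.append(a_aktuell)
--     folge_elemente.add(a_aktuell)
--
--     # REKURSIVER AUFRUF: Rufe die Funktion für den nächsten Schritt (nächsten Index) auf
--     return _recaman_rekursiv_helfer(n, folge, folge_elemente)
-- ===== SOURCE B (Python) =====
-- def _recaman_rekursiv_helfer(n, folge, folge_elemente):
--     # Iterative version: the tail recursion is replaced by a for-loop over the jump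
--     # values i, carrying the current term in a local variable instead of re-reading
--     # folge[-1]; it performs the same in-place appends/adds to folge and folge_elemente.
--     a = folge[-1]
--     for i in range(len(folge), n + 1):
--         s = a - i
--         if s > 0 and s not in folge_elemente:
--             a = s
--         else:
--             a = a + i
--         folge.append(a)
--         folge_elemente.add(a)
--     return a
-- ===== Notes on version B (the rewrite author's own statement) =====
-- stated objective: simpler
-- what changed: The tail recursion threading the whole state through each call is replaced by a plain for-loop over the jump values that carries the current term in a local variable (no folge[-1]/len(folge) re-reads, no recursion depth limit); the same in-place mutations are performed.
import Mathlib
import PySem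

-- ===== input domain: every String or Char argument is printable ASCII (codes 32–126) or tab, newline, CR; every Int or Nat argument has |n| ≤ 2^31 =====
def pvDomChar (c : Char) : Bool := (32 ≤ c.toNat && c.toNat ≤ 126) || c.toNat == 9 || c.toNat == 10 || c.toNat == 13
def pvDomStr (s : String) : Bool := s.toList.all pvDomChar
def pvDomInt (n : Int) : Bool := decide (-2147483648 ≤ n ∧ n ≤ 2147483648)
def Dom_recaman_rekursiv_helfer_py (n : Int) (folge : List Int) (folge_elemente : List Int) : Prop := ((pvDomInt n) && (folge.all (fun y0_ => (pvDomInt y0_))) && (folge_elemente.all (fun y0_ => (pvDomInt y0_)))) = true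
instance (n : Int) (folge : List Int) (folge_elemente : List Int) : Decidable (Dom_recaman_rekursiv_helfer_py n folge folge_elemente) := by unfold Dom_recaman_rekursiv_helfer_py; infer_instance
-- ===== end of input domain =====

-- B replaces A's tail recursion by a for-loop carrying the current term in a local variable.
-- Both Pythons mutate folge/folge_elemente in place identically; the equivalence proved here is
-- about the return value (the ports model the state functionally).

-- ===== PORT A =====
-- Literal port of the recursion; the 'folge.length ≤ n' guard only makes the recursion total
-- (in Python the call diverges when n < len(folge) - 1; Pre_ excludes that region).
def recaman_rekursiv_helfer_py (n : Int) (folge : List Int) (folge_elemente : List Int) : Int :=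
  if n = (folge.length : Int) - 1 then
    (PySem.List.pyGet? folge (-1)).getD 0
  else if _h : (folge.length : Int) ≤ n then
    let a_vorher := (PySem.List.pyGet? folge (-1)).getD 0
    let i : Int := folge.length
    let subtraktion := a_vorher - i
    let a_aktuell :=
      if subtraktion > 0 ∧ ¬ PySem.Set.contains folge_elemente subtraktion then subtraktion
      else a_vorher + i
    recaman_rekursiv_helfer_py n (folge ++ [a_aktuell]) (PySem.Set.add folge_elemente a_aktuell)
  else 0
termination_by (n + 1 - folge.length).toNat
decreasing_by simp; omega

-- ===== PORT B =====
-- Source B's loop body; the Python set is modelled by Std.TreeSet (membership/insert only — the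
-- result never consumes the set's iteration order), so the port evaluates fast on large n.
def recamanAltStep (st : Int × Std.TreeSet Int compare) (i : Int) : Int × Std.TreeSet Int compare :=
  let s := st.1 - i
  let a := if s > 0 ∧ ¬ st.2.contains s then s else st.1 + i
  (a, st.2.insert a)

def recaman_rekursiv_helfer_py_alt (n : Int) (folge : List Int) (folge_elemente : List Int) : Int :=
  let a0 := (PySem.List.pyGet? folge (-1)).getD 0
  let t0 := folge_elemente.foldl (fun t x => t.insert x) (Std.TreeSet.empty : Std.TreeSet Int compare)
  ((PySem.List.pyRange (folge.length : Int) (n + 1) 1).foldl recamanAltStep (a0, t0)).1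

-- ===== PRECONDITION & SPEC =====
-- Pre_ excludes exactly the inputs on which A does not return: folge = [] (IndexError on folge[-1])
-- and n < len(folge) - 1 (the recursion appends forever and never terminates).
def Pre_recaman_rekursiv_helfer_py (n : Int) (folge : List Int) (folge_elemente : List Int) : Prop :=
  folge ≠ [] ∧ (folge.length : Int) - 1 ≤ n
instance (n : Int) (folge : List Int) (folge_elemente : List Int) : Decidable (Pre_recaman_rekursiv_helfer_py n folge folge_elemente) := by unfold Pre_recaman_rekursiv_helfer_py; infer_instance
def pvWitness_recaman_rekursiv_helfer_py : Int × List Int × List Int := (3, [0], [0])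

def Spec_recaman_rekursiv_helfer_py (n : Int) (folge : List Int) (folge_elemente : List Int) (out : Int) : Prop := out = recaman_rekursiv_helfer_py_alt n folge folge_elemente
instance (n : Int) (folge : List Int) (folge_elemente : List Int) (out : Int) : Decidable (Spec_recaman_rekursiv_helfer_py n folge folge_elemente out) := by unfold Spec_recaman_rekursiv_helfer_py; infer_instance

-- ===== CLAIM (what is proved, stated in full; the proofs are below) =====
def Claim_equal_recaman_rekursiv_helfer_py : Prop := ∀ (n : Int) (folge : List Int) (folge_elemente : List Int), Dom_recaman_rekursiv_helfer_py n folge folge_elemente → Pre_recaman_rekursiv_helfer_py n folge folge_elemente → Spec_recaman_rekursiv_helfer_py n folge folge_elemente (recaman_rekursiv_helfer_py n folge folge_elemente)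

-- ===== LEMMAS AND PROOFS =====

-- membership in the TreeSet built by folding inserts = membership in the list
theorem contains_foldl_insert (fe : List Int) : ∀ (t : Std.TreeSet Int compare) (x : Int),
    (fe.foldl (fun t y => t.insert y) t).contains x = (t.contains x || fe.contains x) := by
  induction fe with
  | nil => simp
  | cons y ys ih =>
    intro t x
    simp only [List.foldl_cons, ih, Std.TreeSet.contains_insert, List.contains_cons]
    by_cases h : y = x
    · simp [h]
    · have h1 : (compare y x == Ordering.eq) = false := by
        simp only [beq_eq_false_iff_ne, ne_eq, compare_eq_iff_eq]; exact h
      have h2 : (x == y) = false := by simp; exact fun e => h e.symm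
      rw [h1, h2]
      simp [Bool.or_comm]

-- A's recursion equals B's fold over the remaining jump values, for any TreeSet t with the
-- same membership as the set folge_elemente.
theorem recaman_eq_fold (k : Nat) : ∀ (n : Int) (folge fe : List Int) (t : Std.TreeSet Int compare),
    folge ≠ [] → (folge.length : Int) - 1 ≤ n → (n + 1 - folge.length).toNat = k →
    (∀ x, t.contains x = true ↔ x ∈ fe) →
    recaman_rekursiv_helfer_py n folge fe
      = ((PySem.List.pyRange (folge.length : Int) (n + 1) 1).foldl recamanAltStep
          ((PySem.List.pyGet? folge (-1)).getD 0, t)).1 := by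
  induction k with
  | zero =>
    intro n folge fe t hne hle hk hinv
    have hlen : 0 < folge.length := List.length_pos_of_ne_nil hne
    have h : n = (folge.length : Int) - 1 := by omega
    rw [recaman_rekursiv_helfer_py, PySem.List.pyRange_one_eq_nil (by omega)]
    simp [h]
  | succ k ih =>
    intro n folge fe t hne hle hk hinv
    have hge : (folge.length : Int) ≤ n := by omega
    have hneq : ¬ n = (folge.length : Int) - 1 := by omega
    rw [recaman_rekursiv_helfer_py]
    simp only [hneq, if_false, hge, dif_pos]
    rw [PySem.List.pyRange_one_cons (by omega), List.foldl_cons]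
    set a0 := (PySem.List.pyGet? folge (-1)).getD 0 with ha0
    set sub := a0 - (folge.length : Int) with hsub
    have hcond : (sub > 0 ∧ ¬ PySem.Set.contains fe sub) ↔
        (sub > 0 ∧ ¬ (Std.TreeSet.contains t sub) = true) := by
      constructor <;> rintro ⟨h1, h2⟩ <;> refine ⟨h1, ?_⟩ <;>
        simp only [hinv, PySem.Set.contains_iff] at * <;> exact h2
    set a' := if sub > 0 ∧ ¬ PySem.Set.contains fe sub then sub else a0 + (folge.length : Int)
      with ha'
    have hstep : recamanAltStep (a0, t) (folge.length : Int) = (a', t.insert a') := by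
      simp only [recamanAltStep, ha']
      rw [if_congr hcond rfl rfl]
    rw [hstep]
    have := ih n (folge ++ [a']) (PySem.Set.add fe a') (t.insert a')
      (by simp) (by simp; omega) (by simp; omega)
      (by
        intro x
        rw [Std.TreeSet.contains_insert]
        simp only [Bool.or_eq_true, beq_iff_eq, PySem.Set.mem_add, compare_eq_iff_eq]
        constructor
        · rintro (h | h)
          · exact Or.inr h.symm
          · exact Or.inl ((hinv x).mp h)
        · rintro (h | h)
          · exact Or.inr ((hinv x).mpr h)
          · exact Or.inl h.symm)
    rw [this, PySem.List.pyGet?_neg_one_append_singleton]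
    simp only [Option.getD_some, List.length_append, List.length_cons, List.length_nil,
      Nat.cast_add, Nat.cast_one]
    norm_num

-- ===== VERDICT (by name: the statement is the Claim_ definition above) =====
theorem recaman_rekursiv_helfer_py_spec : Claim_equal_recaman_rekursiv_helfer_py := by
  intro n folge fe _ hpre
  unfold Spec_recaman_rekursiv_helfer_py recaman_rekursiv_helfer_py_alt
  refine (recaman_eq_fold _ n folge fe _ hpre.1 hpre.2 rfl ?_).trans rfl
  intro x
  rw [contains_foldl_insert]
  simp
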